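-- pv_equiv track=rewrite | github.com/SO20201/SO_parcial | keylogger/main.py | normalizarMantenerPresionado
-- ===== SOURCE A (Python) =====
-- def normalizarMantenerPresionado(a):
-- 	c = []
-- 	i = 0
-- 	while(i < len(a)):
-- 		if(len(a[i])==3):
-- 			c.append(a[i])
-- 		else:
-- 			inicio = a[i][1]
-- 			while(len(a[i])==2):
-- 				i += 1
-- 			aux = [a[i][0],inicio,a[i][2]]
-- 			c.append(aux)
-- 		i+=1
-- 	return c
-- ===== SOURCE B (Python) =====
-- def normalizarMantenerPresionado(a):
--     res = []
--     pending = None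
--     for e in a:
--         if pending is None:
--             if len(e) == 2:
--                 pending = e[1]
--             else:
--                 res.append([e[0], e[1], e[2]])
--         elif len(e) != 2:
--             res.append([e[0], pending, e[2]])
--             pending = None
--     return res
-- ===== Notes on version B (the rewrite author's own statement) =====
-- stated objective: simpler
-- what changed: A's index-driven outer while with a nested inner while that skips held-key events is replaced by a single flat pass over the elements carrying a 'pending' press-start state; Pre_ excludes only inputs where A raises IndexError (an event with fewer than 2 fields, or a trailing unterminated press run).
import Mathlib
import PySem

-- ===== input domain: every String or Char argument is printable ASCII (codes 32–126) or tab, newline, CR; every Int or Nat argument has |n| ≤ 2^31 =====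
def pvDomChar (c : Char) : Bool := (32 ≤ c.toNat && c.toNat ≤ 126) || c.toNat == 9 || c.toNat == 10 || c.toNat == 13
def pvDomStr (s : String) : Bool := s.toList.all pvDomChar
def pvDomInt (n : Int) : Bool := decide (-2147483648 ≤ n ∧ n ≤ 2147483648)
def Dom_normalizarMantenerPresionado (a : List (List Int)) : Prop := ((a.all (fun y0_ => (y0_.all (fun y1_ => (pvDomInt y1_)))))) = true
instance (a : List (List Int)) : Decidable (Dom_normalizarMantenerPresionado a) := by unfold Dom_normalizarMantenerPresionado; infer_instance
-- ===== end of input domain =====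

-- B replaces A's index-based outer loop with a nested skipping inner while by a single flat
-- pass carrying a `pending` press-start value (objective: simpler).

-- ===== PORT A =====
-- A's loop state is the index i into the immutable list a; we port it as the suffix of a
-- starting at i (the only part the loop ever reads).  `skipA` is the inner
-- `while(len(a[i])==2): i += 1`; it returns the suffix at the terminator, `none` = IndexError.
def skipA (l : List (List Int)) : Option (List (List Int)) :=
  match l with
  | [] => none
  | e :: rest => if e.length == 2 then skipA rest else some (e :: rest)

theorem skipA_length_le (l l' : List (List Int)) (h : skipA l = some l') :
    l'.length ≤ l.length := by
  induction l with
  | nil => simp [skipA] at h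
  | cons e rest ih =>
    simp only [skipA] at h
    split at h
    · exact Nat.le_trans (ih h) (Nat.le_succ _)
    · cases h; exact Nat.le_refl _

-- the outer while; c is the accumulator list; none = an IndexError raised by the Python
def loopA (l : List (List Int)) (c : List (List Int)) : Option (List (List Int)) :=
  match l with
  | [] => some c
  | e :: rest =>
    if e.length == 3 then loopA rest (c ++ [e])
    else
      match e[1]? with
      | none => none
      | some inicio =>
        match hs : skipA (e :: rest) with
        | none => none
        | some [] => none
        | some (t :: rest') =>
          match t[0]?, t[2]? with
          | some t0, some t2 => loopA rest' (c ++ [[t0, inicio, t2]])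
          | _, _ => none
termination_by l.length
decreasing_by
  · simp
  · have := skipA_length_le _ _ hs
    simp at this ⊢
    omega

def normalizarMantenerPresionado (a : List (List Int)) : List (List Int) :=
  (loopA a []).getD []

-- ===== PORT B =====
-- single pass; `pending` is the start time of an unmerged press run; none = IndexError
def loopB (l : List (List Int)) (pending : Option Int) (res : List (List Int)) :
    Option (List (List Int)) :=
  match l with
  | [] => some res
  | e :: rest =>
    match pending with
    | none =>
      if e.length == 2 then
        match e[1]? with
        | some p => loopB rest (some p) res
        | none => none
      else
        match e[0]?, e[1]?, e[2]? with
        | some x0, some x1, some x2 => loopB rest none (res ++ [[x0, x1, x2]])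
        | _, _, _ => none
    | some p =>
      if e.length == 2 then loopB rest pending res
      else
        match e[0]?, e[2]? with
        | some x0, some x2 => loopB rest none (res ++ [[x0, p, x2]])
        | _, _ => none

def normalizarMantenerPresionado_alt (a : List (List Int)) : List (List Int) :=
  (loopB a none []).getD []

-- ===== PRECONDITION & SPEC =====
-- Pre_ is exactly where the Python A returns: every event has ≥ 2 fields (else a[i][1] /
-- a[i][0] / a[i][2] raises IndexError) and the list does not end in an unterminated
-- length-2 press run (else the inner while runs past the end, IndexError).
def Pre_normalizarMantenerPresionado (a : List (List Int)) : Prop :=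
  (∀ e ∈ a, 2 ≤ e.length) ∧ a.getLast?.map List.length ≠ some 2

instance (a : List (List Int)) : Decidable (Pre_normalizarMantenerPresionado a) := by
  unfold Pre_normalizarMantenerPresionado; infer_instance

def pvWitness_normalizarMantenerPresionado : List (List Int) := [[1, 2], [3, 4, 5], [6, 7, 8]]

def Spec_normalizarMantenerPresionado (a : List (List Int)) (out : List (List Int)) : Prop :=
  out = normalizarMantenerPresionado_alt a
instance (a : List (List Int)) (out : List (List Int)) :
    Decidable (Spec_normalizarMantenerPresionado a out) := by
  unfold Spec_normalizarMantenerPresionado; infer_instance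

-- ===== CLAIM (what is proved, stated in full; the proofs are below) =====
def Claim_equal_normalizarMantenerPresionado : Prop :=
  ∀ (a : List (List Int)), Dom_normalizarMantenerPresionado a →
    Pre_normalizarMantenerPresionado a →
    Spec_normalizarMantenerPresionado a (normalizarMantenerPresionado a)

-- ===== LEMMAS AND PROOFS =====

theorem skipA_suffix (l l' : List (List Int)) (h : skipA l = some l') : l' <:+ l := by
  induction l with
  | nil => simp [skipA] at h
  | cons e rest ih =>
    simp only [skipA] at h
    split at h
    · exact (ih h).trans (List.suffix_cons e rest)
    · cases h; exact List.suffix_refl _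

theorem getLast?_of_suffix {α : Type} (l l' : List α) (h : l' <:+ l) (hne : l' ≠ []) :
    l'.getLast? = l.getLast? := by
  obtain ⟨w, rfl⟩ := h
  exact (List.getLast?_append_of_ne_nil w hne).symm

theorem getLast?_cons_ne {α : Type} (e : α) (rest : List α) (h : rest ≠ []) :
    (e :: rest).getLast? = rest.getLast? := by
  simpa using List.getLast?_append_of_ne_nil [e] h

-- B on a press run: with `pending = some p` set and the run (under Pre_) guaranteed to
-- terminate, loopB skips to the terminator t, emits [t[0], p, t[2]] and resets pending;
-- skipA finds the same terminator.
theorem runLemma (l : List (List Int)) (p : Int) (res : List (List Int))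
    (hlen : ∀ e ∈ l, 2 ≤ e.length) (hlast : l.getLast?.map List.length ≠ some 2)
    (hne : l ≠ []) :
    ∃ t rest' t0 t2, skipA l = some (t :: rest') ∧ t[0]? = some t0 ∧ t[2]? = some t2 ∧
      loopB l (some p) res = loopB rest' none (res ++ [[t0, p, t2]]) := by
  induction l with
  | nil => exact absurd rfl hne
  | cons e rest ih =>
    by_cases h2 : e.length = 2
    · have hrne : rest ≠ [] := by
        rintro rfl
        simp [List.getLast?, h2] at hlast
      have hlast' : rest.getLast?.map List.length ≠ some 2 := by
        rwa [getLast?_cons_ne e rest hrne] at hlast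
      obtain ⟨t, rest', t0, t2, hs, h0, h2', hB⟩ :=
        ih (fun e he => hlen e (List.mem_cons_of_mem _ he)) hlast' hrne
      refine ⟨t, rest', t0, t2, ?_, h0, h2', ?_⟩
      · simp [skipA, h2, hs]
      · simp only [loopB, h2]
        simpa using hB
    · have hge : 2 ≤ e.length := hlen e List.mem_cons_self
      have h3 : 3 ≤ e.length := by omega
      obtain ⟨t0, h0⟩ : ∃ x, e[0]? = some x := ⟨e[0], List.getElem?_eq_getElem (by omega)⟩
      obtain ⟨t2, h2'⟩ : ∃ x, e[2]? = some x := ⟨e[2], List.getElem?_eq_getElem (by omega)⟩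
      refine ⟨e, rest, t0, t2, ?_, h0, h2', ?_⟩
      · simp [skipA, h2]
      · simp [loopB, h2, h0, h2']

theorem mainLemma (n : Nat) (l : List (List Int)) (c : List (List Int))
    (hn : l.length ≤ n)
    (hlen : ∀ e ∈ l, 2 ≤ e.length) (hlast : l.getLast?.map List.length ≠ some 2) :
    loopA l c = loopB l none c := by
  induction n generalizing l c with
  | zero =>
    have : l = [] := List.length_eq_zero_iff.mp (Nat.le_zero.mp hn)
    subst this; simp [loopA, loopB]
  | succ m ih =>
    match l with
    | [] => simp [loopA, loopB]
    | e :: rest =>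
      have hge : 2 ≤ e.length := hlen e List.mem_cons_self
      have hlenr : ∀ x ∈ rest, 2 ≤ x.length := fun x hx => hlen x (List.mem_cons_of_mem _ hx)
      have hlastr : rest ≠ [] → rest.getLast?.map List.length ≠ some 2 := by
        intro hrne
        rwa [getLast?_cons_ne e rest hrne] at hlast
      by_cases h3 : e.length = 3
      · obtain ⟨x, y, z, rfl⟩ : ∃ x y z, e = [x, y, z] := by
          match e, h3 with
          | [x, y, z], _ => exact ⟨x, y, z, rfl⟩
        have hA : loopA ([x, y, z] :: rest) c = loopA rest (c ++ [[x, y, z]]) := by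
          simp [loopA]
        have hB : loopB ([x, y, z] :: rest) none c = loopB rest none (c ++ [[x, y, z]]) := by
          simp [loopB]
        rw [hA, hB]
        rcases eq_or_ne rest [] with rfl | hrne
        · simp [loopA, loopB]
        · exact ih rest _ (by simpa using Nat.lt_succ_iff.mp (by simpa using hn))
            hlenr (hlastr hrne)
      · obtain ⟨e1, he1⟩ : ∃ x, e[1]? = some x := ⟨e[1], List.getElem?_eq_getElem (by omega)⟩
        by_cases h2 : e.length = 2
        · -- press-run starter: A skips the run with skipA, B carries pending = e[1]
          have hrne : rest ≠ [] := by
            rintro rfl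
            simp [List.getLast?, h2] at hlast
          obtain ⟨t, rest', t0, t2, hs, h0, h2', hB⟩ :=
            runLemma rest e1 c hlenr (hlastr hrne) hrne
          have hBfull : loopB (e :: rest) none c = loopB rest' none (c ++ [[t0, e1, t2]]) := by
            simp only [loopB, h2, he1]
            simpa using hB
          have hsfull : skipA (e :: rest) = some (t :: rest') := by simp [skipA, h2, hs]
          have hAfull : loopA (e :: rest) c = loopA rest' (c ++ [[t0, e1, t2]]) := by
            rw [loopA]
            simp only [h3, beq_iff_eq, if_false, he1]
            split
            next h => rw [hsfull] at h; cases h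
            next h => rw [hsfull] at h; cases h
            next t' rest'' h =>
              rw [hsfull] at h
              injection h with h
              cases h
              simp [h0, h2']
          rw [hAfull, hBfull]
          have hsuf : (t :: rest') <:+ rest := skipA_suffix _ _ hs
          have hlen' : ∀ x ∈ rest', 2 ≤ x.length := fun x hx =>
            hlenr x (hsuf.subset (List.mem_cons_of_mem _ hx))
          have hlast' : rest'.getLast?.map List.length ≠ some 2 := by
            rcases eq_or_ne rest' [] with rfl | hrne'
            · simp
            · have : (t :: rest').getLast? = rest.getLast? :=
                getLast?_of_suffix _ _ hsuf (by simp)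
              rw [getLast?_cons_ne t rest' hrne'] at this
              rw [this]; exact hlastr hrne
          have hlsz : rest'.length ≤ m := by
            have h1 : (t :: rest').length ≤ rest.length := hsuf.length_le
            have h2'' : rest.length + 1 ≤ m + 1 := by simpa using hn
            simp at h1; omega
          exact ih rest' _ hlsz hlen' hlast'
        · -- length ≥ 4: both emit the first three fields of e
          have h4 : 4 ≤ e.length := by omega
          obtain ⟨e0, he0⟩ : ∃ x, e[0]? = some x := ⟨e[0], List.getElem?_eq_getElem (by omega)⟩
          obtain ⟨e2, he2⟩ : ∃ x, e[2]? = some x := ⟨e[2], List.getElem?_eq_getElem (by omega)⟩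
          have hsfull : skipA (e :: rest) = some (e :: rest) := by simp [skipA, h2]
          have hAfull : loopA (e :: rest) c = loopA rest (c ++ [[e0, e1, e2]]) := by
            rw [loopA]
            simp only [h3, beq_iff_eq, if_false, he1]
            split
            next h => rw [hsfull] at h; cases h
            next h => rw [hsfull] at h; cases h
            next t' rest'' h =>
              rw [hsfull] at h
              injection h with h
              cases h
              simp [he0, he2]
          have hBfull : loopB (e :: rest) none c = loopB rest none (c ++ [[e0, e1, e2]]) := by
            simp [loopB, h2, he0, he1, he2]
          rw [hAfull, hBfull]
          rcases eq_or_ne rest [] with rfl | hrne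
          · simp [loopA, loopB]
          · exact ih rest _ (by simpa using Nat.lt_succ_iff.mp (by simpa using hn))
              hlenr (hlastr hrne)

-- ===== VERDICT (by name: the statement is the Claim_ definition above) =====
theorem normalizarMantenerPresionado_spec : Claim_equal_normalizarMantenerPresionado := by
  intro a _ hpre
  unfold Spec_normalizarMantenerPresionado normalizarMantenerPresionado
    normalizarMantenerPresionado_alt
  rw [mainLemma a.length a [] (Nat.le_refl _) hpre.1 hpre.2]
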